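-- pv_equiv track=rewrite | github.com/saisudheerakkireddy/genai_projects | extracted_projects/Sai-Preetham007-Group-AH-f55ca60/src/evaluation/medical_guardrails.py | _check_sources
-- ===== SOURCE A (Python) =====
-- from typing import List, Dict, Any, Optional, Tuple
--
-- def _check_sources(sources: List[Dict[str, Any]]) -> Dict[str, Any]:
--     """Check quality and reliability of sources"""
--     warnings = []
--     suggestions = []
--
--     if not sources:
--         warnings.append("No sources provided for medical information")
--         return {"warnings": warnings, "suggestions": suggestions}
--
--     # Check source diversity
--     source_types = set(source.get("source", "Unknown") for source in sources)
--     if len(source_types) < 2: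
--         suggestions.append("Consider including multiple source types for better reliability")
--
--     # Check source credibility
--     credible_sources = ["FDA", "WHO", "ClinicalTrials.gov", "PubMed"]
--     has_credible_source = any(
--         any(credible in source.get("source", "") for credible in credible_sources)
--         for source in sources
--     )
--
--     if not has_credible_source:
--         warnings.append("No credible medical sources found in retrieved information")
--
--     return {
--         "warnings": warnings,
--         "suggestions": suggestions
--     }
-- ===== SOURCE B (Python) =====
-- def _check_sources(sources):
--     """Check quality and reliability of sources"""
--     if not sources:
--         return {"warnings": ["No sources provided for medical information"],
--                 "suggestions": []}
--
--     # No set: diversity holds iff some source's type differs from the first's.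
--     first_type = sources[0].get("source", "Unknown")
--     diverse = False
--     credible = False
--     for src in sources:
--         if not diverse and src.get("source", "Unknown") != first_type:
--             diverse = True
--         if not credible:
--             name = src.get("source", "")
--             if ("FDA" in name or "WHO" in name
--                     or "ClinicalTrials.gov" in name or "PubMed" in name):
--                 credible = True
--         if diverse and credible:
--             break  # both questions settled; stop scanning
--
--     warnings = [] if credible else [
--         "No credible medical sources found in retrieved information"]
--     suggestions = [] if diverse else [
--         "Consider including multiple source types for better reliability"]
--     return {"warnings": warnings, "suggestions": suggestions}
-- ===== Notes on version B (the rewrite author's own statement) =====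
-- stated objective: alternative
-- what changed: B eliminates A's set of source types: diversity is decided by comparing each source's type against the first source's type (constant extra state instead of building a set), and the scan stops early once both a differing type and a credible source have been seen.
import Mathlib
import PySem

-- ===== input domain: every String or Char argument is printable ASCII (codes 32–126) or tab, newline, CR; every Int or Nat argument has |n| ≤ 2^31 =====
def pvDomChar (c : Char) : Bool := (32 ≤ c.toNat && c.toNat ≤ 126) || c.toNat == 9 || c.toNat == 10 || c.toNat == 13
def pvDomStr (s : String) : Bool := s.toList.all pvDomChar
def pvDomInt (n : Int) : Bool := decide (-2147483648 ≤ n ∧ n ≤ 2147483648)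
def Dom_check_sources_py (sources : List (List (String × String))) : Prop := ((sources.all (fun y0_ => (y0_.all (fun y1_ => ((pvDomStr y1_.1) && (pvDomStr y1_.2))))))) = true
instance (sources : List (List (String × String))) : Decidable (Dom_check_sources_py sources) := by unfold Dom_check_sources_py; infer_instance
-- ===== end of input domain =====

-- B drops A's set of source types: diversity is decided by comparing against the first source's
-- type with constant extra state, and the scan stops early once both answers are settled.

-- ===== PORT A =====
def pvCredibles : List String := ["FDA", "WHO", "ClinicalTrials.gov", "PubMed"]

def check_sources_py (sources : List (List (String × String))) : List (String × List String) :=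
  if sources = [] then
    [("warnings", ["No sources provided for medical information"]), ("suggestions", [])]
  else
    -- source_types = set(source.get("source", "Unknown") for source in sources)
    let sourceTypes : PySem.Set String :=
      PySem.Set.ofList (sources.map (fun src => PySem.Dict.getD ⟨src⟩ "source" "Unknown"))
    let suggestions : List String :=
      if PySem.Set.len sourceTypes < 2 then
        ["Consider including multiple source types for better reliability"]
      else []
    -- has_credible_source = any(any(credible in source.get("source","") …) …)
    let hasCredibleSource : Bool :=
      sources.any (fun src =>
        pvCredibles.any (fun credible => PySem.Str.isIn credible (PySem.Dict.getD ⟨src⟩ "source" "")))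
    let warnings : List String :=
      if hasCredibleSource then []
      else ["No credible medical sources found in retrieved information"]
    [("warnings", warnings), ("suggestions", suggestions)]

-- ===== PORT B =====
-- "FDA" in name or "WHO" in name or "ClinicalTrials.gov" in name or "PubMed" in name
def pvCredName (name : String) : Bool :=
  PySem.Str.isIn "FDA" name || PySem.Str.isIn "WHO" name ||
  PySem.Str.isIn "ClinicalTrials.gov" name || PySem.Str.isIn "PubMed" name

-- the 'for src in sources: … if diverse and credible: break' loop
def pvScan (firstType : String) :
    List (List (String × String)) → Bool → Bool → Bool × Bool
  | [], diverse, credible => (diverse, credible)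
  | src :: rest, diverse, credible =>
    let diverse' :=
      if !diverse && (PySem.Dict.getD ⟨src⟩ "source" "Unknown" != firstType) then true
      else diverse
    let credible' :=
      if !credible && pvCredName (PySem.Dict.getD ⟨src⟩ "source" "") then true
      else credible
    if diverse' && credible' then (diverse', credible')   -- break
    else pvScan firstType rest diverse' credible'

def check_sources_py_alt (sources : List (List (String × String))) : List (String × List String) :=
  match sources with
  | [] => [("warnings", ["No sources provided for medical information"]), ("suggestions", [])]
  | first :: rest =>
    let firstType := PySem.Dict.getD ⟨first⟩ "source" "Unknown"
    let r := pvScan firstType (first :: rest) false false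
    let warnings : List String :=
      if r.2 then [] else ["No credible medical sources found in retrieved information"]
    let suggestions : List String :=
      if r.1 then [] else ["Consider including multiple source types for better reliability"]
    [("warnings", warnings), ("suggestions", suggestions)]

-- ===== PRECONDITION & SPEC =====
def Spec_check_sources_py (sources : List (List (String × String))) (out : List (String × List String)) : Prop := out = check_sources_py_alt sources
instance (sources : List (List (String × String))) (out : List (String × List String)) : Decidable (Spec_check_sources_py sources out) := by unfold Spec_check_sources_py; infer_instance

-- ===== CLAIM =====
def Claim_equal_check_sources_py : Prop := ∀ (sources : List (List (String × String))), Dom_check_sources_py sources → Spec_check_sources_py sources (check_sources_py sources)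

-- ===== LEMMAS AND PROOFS =====

-- B's loop (early exit included) computes exactly the two 'any' passes of A.
theorem pvScan_eq (ft : String) (xs : List (List (String × String))) (d c : Bool) :
    pvScan ft xs d c =
      (d || xs.any (fun src => PySem.Dict.getD ⟨src⟩ "source" "Unknown" != ft),
       c || xs.any (fun src => pvCredName (PySem.Dict.getD ⟨src⟩ "source" ""))) := by
  induction xs generalizing d c with
  | nil => simp [pvScan]
  | cons x xs ih =>
    cases hdv : (PySem.Dict.getD ⟨x⟩ "source" "Unknown" != ft) <;>
      cases hcv : pvCredName (PySem.Dict.getD ⟨x⟩ "source" "") <;>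
      cases d <;> cases c <;>
      simp [pvScan, hdv, hcv, ih]

-- B's four-way disjunction is A's inner any over the credible list.
theorem pvCredName_eq (name : String) :
    pvCredName name = pvCredibles.any (fun credible => PySem.Str.isIn credible name) := by
  simp [pvCredName, pvCredibles, Bool.or_assoc]

-- folding Set.add never shrinks the carrier
theorem foldl_add_len_mono (xs : List String) (s : PySem.Set String) :
    s.length ≤ (xs.foldl PySem.Set.add s).length := by
  induction xs generalizing s with
  | nil => simp
  | cons x xs ih =>
    refine le_trans ?_ (ih (PySem.Set.add s x))
    simp only [PySem.Set.add]
    split <;> simp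

-- the deduplicated type list is a singleton iff every later type equals the first
theorem foldl_add_singleton_lt_two (x : String) (xs : List String) :
    ((xs.foldl PySem.Set.add [x]).length < 2) ↔ xs.all (fun y => y == x) := by
  induction xs with
  | nil => simp
  | cons y ys ih =>
    by_cases h : y = x
    · subst h
      have hx : PySem.Set.add [y] y = [y] := by simp [PySem.Set.add]
      simp only [List.foldl_cons, List.all_cons, BEq.rfl, Bool.true_and, hx]
      exact ih
    · have hc : PySem.Set.add [x] y = [x, y] := by
        simp only [PySem.Set.add]
        split
        · next hcon =>
            exfalso
            rw [PySem.Set.contains_eq_listContains] at hcon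
            simp at hcon
            exact h hcon
        · rfl
      simp only [List.foldl_cons, List.all_cons, hc]
      have hm := foldl_add_len_mono ys [x, y]
      have h2 : ([x, y] : List String).length = 2 := rfl
      rw [h2] at hm
      constructor
      · intro hlt; omega
      · intro hall
        simp only [Bool.and_eq_true, beq_iff_eq] at hall
        exact absurd hall.1 h

theorem check_sources_py_spec : Claim_equal_check_sources_py := by
  intro sources _
  unfold Spec_check_sources_py
  cases sources with
  | nil => rfl
  | cons h t =>
    simp only [check_sources_py, check_sources_py_alt, reduceCtorEq, if_false]
    rw [pvScan_eq]
    simp only [Bool.false_or, List.any_cons, bne_self_eq_false, Bool.false_or]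
    have hset : PySem.Set.ofList
        ((h :: t).map (fun src => PySem.Dict.getD ⟨src⟩ "source" "Unknown")) =
        (t.map (fun src => PySem.Dict.getD ⟨src⟩ "source" "Unknown")).foldl
          PySem.Set.add [PySem.Dict.getD ⟨h⟩ "source" "Unknown"] := by
      simp [PySem.Set.ofList_eq_foldl, PySem.Set.add]
    congr 1
    · -- warnings: credibility flags agree
      congr 2
      simp only [pvCredName_eq]
    · -- suggestions: set-size test agrees with first-type comparison
      congr 1
      rw [PySem.Set.len, hset]
      by_cases hd : (t.any (fun src =>
          PySem.Dict.getD ⟨src⟩ "source" "Unknown" != PySem.Dict.getD ⟨h⟩ "source" "Unknown")) = true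
      · have hnlt : ¬ ((t.map (fun src => PySem.Dict.getD ⟨src⟩ "source" "Unknown")).foldl
            PySem.Set.add [PySem.Dict.getD ⟨h⟩ "source" "Unknown"]).length < 2 := by
          rw [foldl_add_singleton_lt_two, List.all_map]
          simp only [List.any_eq_true] at hd
          obtain ⟨y, hy, hne⟩ := hd
          simp only [List.all_eq_true, Function.comp]
          intro hall
          have := hall y hy
          simp_all
        have hnlt' : ¬ (((((t.map (fun src => PySem.Dict.getD ⟨src⟩ "source" "Unknown")).foldl
            PySem.Set.add [PySem.Dict.getD ⟨h⟩ "source" "Unknown"]).length : Int)) < 2) := by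
          exact_mod_cast hnlt
        rw [if_neg hnlt']
        simp [hd]
      · have hlt : ((t.map (fun src => PySem.Dict.getD ⟨src⟩ "source" "Unknown")).foldl
            PySem.Set.add [PySem.Dict.getD ⟨h⟩ "source" "Unknown"]).length < 2 := by
          rw [foldl_add_singleton_lt_two, List.all_map]
          simp only [List.any_eq_true, not_exists] at hd
          simp only [List.all_eq_true, Function.comp]
          intro y hy
          by_contra hne
          exact hd y ⟨hy, by simp_all⟩
        have hlt' : ((((t.map (fun src => PySem.Dict.getD ⟨src⟩ "source" "Unknown")).foldl
            PySem.Set.add [PySem.Dict.getD ⟨h⟩ "source" "Unknown"]).length : Int)) < 2 := by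
          exact_mod_cast hlt
        rw [if_pos hlt']
        simp only [Bool.not_eq_true] at hd
        simp [hd]
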